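-- pv_equiv track=rewrite | github.com/MrBrantCode/unitest_baseline | mut_generate/mist_train_cf/cf_5837/solution.py | calculate_special_sum
-- ===== SOURCE A (Python) =====
-- def calculate_special_sum(arr):
--     """
--     This function calculates the sum of every fourth element in the list,
--     skipping elements in a specific pattern.
--
--     Args:
--     arr (list): A list of integers.
--
--     Returns:
--     int: The sum of every fourth element in the list.
--     """
--     index = 0
--     skip = 3
--     total_sum = 0
--
--     while index < len(arr):
--         total_sum += arr[index]
--         index += skip
--         skip += 2
--
--     return total_sum
-- ===== SOURCE B (Python) =====
-- def calculate_special_sum(arr):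
--     # The indices A visits (0, 3, 8, 15, ...) are exactly the perfect squares
--     # minus one.  So: stage 1 precomputes the set of perfect squares up to
--     # len(arr); stage 2 scans the whole list once, summing the elements whose
--     # 1-based position lies in that set.
--     squares = {k * k for k in range(1, len(arr) + 1)}
--     return sum(x for i, x in enumerate(arr, 1) if i in squares)
-- ===== Notes on version B (the rewrite author's own statement) =====
-- stated objective: alternative
-- what changed: Replaces A's index-skip walk (two co-evolving accumulators) with two staged passes: precompute the set of perfect squares up to len(arr), then a single filtered-sum scan over enumerate(arr, 1) keeping positions that lie in the set.
import Mathlib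
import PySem

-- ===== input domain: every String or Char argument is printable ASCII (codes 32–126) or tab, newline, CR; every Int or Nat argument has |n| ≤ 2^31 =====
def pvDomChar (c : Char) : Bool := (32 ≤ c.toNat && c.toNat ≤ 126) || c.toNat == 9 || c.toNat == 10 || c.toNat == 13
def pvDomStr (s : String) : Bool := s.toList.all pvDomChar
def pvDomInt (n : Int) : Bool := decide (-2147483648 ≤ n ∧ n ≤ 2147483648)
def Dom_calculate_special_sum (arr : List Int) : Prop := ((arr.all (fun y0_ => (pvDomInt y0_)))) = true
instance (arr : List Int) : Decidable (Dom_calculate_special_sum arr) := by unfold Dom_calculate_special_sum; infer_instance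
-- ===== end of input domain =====

-- B recasts A's index-skip walk as "sum at perfect-square positions": it builds the set of
-- perfect squares up to len(arr), then does one filtered-sum pass over the enumerated list.

-- ===== PORT A =====
-- A's while loop: state (index, skip, total). Termination needs skip ≥ 3, so skip is
-- stored shifted as s with skip = s + 3 (s starts at 0); otherwise a literal transcription.
def calcA_go (arr : List Int) (index s : Nat) (total : Int) : Int :=
  if h : index < arr.length then
    calcA_go arr (index + (s + 3)) (s + 2) (total + arr[index])
  else total
termination_by arr.length - index
decreasing_by omega

def calculate_special_sum (arr : List Int) : Int := calcA_go arr 0 0 0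

-- ===== PORT B =====
-- Source B: squares = {k*k for k in range(1, len(arr)+1)};
--       sum(x for i, x in enumerate(arr, 1) if i in squares)
def calculate_special_sum_alt (arr : List Int) : Int :=
  let squares : PySem.Set Int :=
    PySem.Set.ofList ((PySem.List.pyRange 1 ((arr.length : Int) + 1) 1).map (fun k => k * k))
  ((((PySem.List.enumerate arr 1).filter (fun p => squares.contains p.1)).map (fun p => p.2)).sum)

-- ===== PRECONDITION & SPEC =====
def Spec_calculate_special_sum (arr : List Int) (out : Int) : Prop := out = calculate_special_sum_alt arr
instance (arr : List Int) (out : Int) : Decidable (Spec_calculate_special_sum arr out) := by unfold Spec_calculate_special_sum; infer_instance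

-- ===== CLAIM (what is proved, stated in full; the proofs are below) =====
def Claim_equal_calculate_special_sum : Prop := ∀ (arr : List Int), Dom_calculate_special_sum arr → Spec_calculate_special_sum arr (calculate_special_sum arr)

-- ===== LEMMAS AND PROOFS =====

-- Proof-side middle form: a counter walk over k = 1, 2, … at index k*k - 1.
def cntGo (arr : List Int) (k : Nat) (total : Int) : Int :=
  if h : k * k - 1 < arr.length then
    cntGo arr (k + 1) (total + arr[k * k - 1])
  else total
termination_by arr.length + 1 - k
decreasing_by have hkk : k ≤ k * k := by
                rcases Nat.eq_zero_or_pos k with h0 | h0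
                · omega
                · nlinarith
              omega

-- Invariant: at counter k ≥ 1, A's state is index = k*k - 1, s = 2*(k - 1).
lemma go_eq (arr : List Int) (k : Nat) (hk : 1 ≤ k) (total : Int) :
    calcA_go arr (k * k - 1) (2 * (k - 1)) total = cntGo arr k total := by
  unfold calcA_go cntGo
  split
  · next h =>
      have hi : k * k - 1 + (2 * (k - 1) + 3) = (k + 1) * (k + 1) - 1 := by
        have h1 : 1 ≤ k * k := Nat.one_le_iff_ne_zero.mpr (by positivity)
        have e : (k + 1) * (k + 1) = k * k + 2 * k + 1 := by ring
        omega
      have hs : 2 * (k - 1) + 2 = 2 * (k + 1 - 1) := by omega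
      rw [hi, hs, go_eq arr (k + 1) (by omega)]
  · rfl
termination_by arr.length + 1 - k
decreasing_by have hkk : k ≤ k * k := by nlinarith
              omega

-- The counter walk totals arr at indices m*m - 1 for m = k .. sqrt (len arr).
lemma cnt_sum (arr : List Int) (k : Nat) (hk : 1 ≤ k) (total : Int) :
    cntGo arr k total
      = total + (((List.range' k (Nat.sqrt arr.length + 1 - k)).map
          (fun m => arr.getD (m * m - 1) 0)).sum) := by
  unfold cntGo
  split
  · next h =>
      have hle : k * k ≤ arr.length := by
        have h1 : 1 ≤ k * k := Nat.one_le_iff_ne_zero.mpr (by positivity)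
        omega
      have hks : k ≤ Nat.sqrt arr.length := Nat.le_sqrt.mpr hle
      have hcnt : Nat.sqrt arr.length + 1 - k = (Nat.sqrt arr.length + 1 - (k + 1)) + 1 := by omega
      rw [hcnt, List.range'_succ, cnt_sum arr (k + 1) (by omega), List.map_cons, List.sum_cons,
        List.getD_eq_getElem arr 0 h]
      ring
  · next h =>
      have hgt : Nat.sqrt arr.length < k := by
        by_contra hcon
        have hle : k * k ≤ arr.length := Nat.le_sqrt.mp (by omega)
        have h1 : 1 ≤ k * k := Nat.one_le_iff_ne_zero.mpr (by positivity)
        omega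
      have hz : Nat.sqrt arr.length + 1 - k = 0 := by omega
      simp [hz]
termination_by arr.length + 1 - k
decreasing_by have hkk : k ≤ k * k := by nlinarith
              omega

-- The perfect-square positions below n are exactly the squares of 1 .. sqrt n, minus one.
lemma filter_sq_range (n : Nat) :
    (List.range n).filter (fun j => decide (Nat.sqrt (j + 1) * Nat.sqrt (j + 1) = j + 1))
      = (List.range' 1 (Nat.sqrt n)).map (fun m => m * m - 1) := by
  induction n with
  | zero => simp
  | succ n ih =>
      rw [List.range_succ, List.filter_append, ih]
      by_cases hsq : Nat.sqrt (n + 1) * Nat.sqrt (n + 1) = n + 1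
      · have hlt : Nat.sqrt n < Nat.sqrt (n + 1) := by
          have := Nat.sqrt_lt'.mpr (show n < Nat.sqrt (n + 1) ^ 2 by nlinarith)
          omega
        have hle : Nat.sqrt (n + 1) ≤ Nat.sqrt n + 1 := by
          have h1 : 1 ≤ Nat.sqrt (n + 1) := by nlinarith
          have h2 : (Nat.sqrt (n + 1) - 1) * (Nat.sqrt (n + 1) - 1) ≤ n := by
            nlinarith [Nat.sub_add_cancel h1]
          have := Nat.le_sqrt.mpr h2
          omega
        have heq : Nat.sqrt (n + 1) = Nat.sqrt n + 1 := by omega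
        rw [heq, List.range'_concat, List.map_append]
        have hel : (1 + Nat.sqrt n) * (1 + Nat.sqrt n) = n + 1 := by
          rw [heq] at hsq; nlinarith [hsq]
        simp only [List.map_cons, List.map_nil, List.filter_cons, hsq, decide_true]
        congr 1
        simp
        omega
      · have heq : Nat.sqrt (n + 1) = Nat.sqrt n := by
          have hmono : Nat.sqrt n ≤ Nat.sqrt (n + 1) := Nat.sqrt_le_sqrt (by omega)
          by_contra hne
          have h1 : Nat.sqrt n + 1 ≤ Nat.sqrt (n + 1) := by omega
          have h2 : Nat.sqrt (n + 1) * Nat.sqrt (n + 1) ≤ n + 1 := Nat.sqrt_le (n + 1)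
          have h3 : n < (Nat.sqrt n + 1) * (Nat.sqrt n + 1) := by
            have := Nat.lt_succ_sqrt n; omega
          exact hsq (by nlinarith)
        rw [heq]
        simp [hsq]

-- Python's 'x in l' as a decide.
lemma contains_eq_decide_mem (l : List Int) (x : Int) : l.contains x = decide (x ∈ l) := by
  by_cases h : x ∈ l <;> simp [h]

-- Membership of position 1 + j (j < n) in Source B's squares list is "j + 1 is a perfect square".
lemma mem_squares (n j : Nat) (hj : j < n) :
    ((1 : Int) + j) ∈ (PySem.List.pyRange 1 ((n : Int) + 1) 1).map (fun k => k * k)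
      ↔ Nat.sqrt (j + 1) * Nat.sqrt (j + 1) = j + 1 := by
  rw [List.mem_map]
  constructor
  · rintro ⟨k, hk, hkk⟩
    rw [PySem.List.mem_pyRange_one] at hk
    have hk1 : 1 ≤ k.toNat := by omega
    have hnat : k.toNat * k.toNat = j + 1 := by
      have hcast : ((k.toNat : Int)) = k := by omega
      have h2 : ((k.toNat : Int)) * ((k.toNat : Int)) = (j : Int) + 1 := by rw [hcast]; omega
      exact_mod_cast h2
    have hs : Nat.sqrt (j + 1) = k.toNat := by
      rw [← hnat, ← pow_two, Nat.sqrt_eq']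
    rw [hs, hnat]
  · intro hsq
    refine ⟨(Nat.sqrt (j + 1) : Int), ?_, by omega⟩
    rw [PySem.List.mem_pyRange_one]
    have h1 : 1 ≤ Nat.sqrt (j + 1) := by nlinarith
    have h2 : Nat.sqrt (j + 1) ≤ n := by nlinarith
    omega

-- The filtered enumerate-sum as a sum over filtered 0-based positions.
lemma esum (sq : PySem.Set Int) (xs : List Int) (s : Int) :
    (((PySem.List.enumerate xs s).filter (fun p => sq.contains p.1)).map (fun p => p.2)).sum
      = (((List.range xs.length).filter (fun (j : Nat) => sq.contains (s + (j : Int)))).map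
          (fun (j : Nat) => xs.getD j 0)).sum := by
  induction xs generalizing s with
  | nil => simp [PySem.List.enumerate]
  | cons x xs ih =>
      rw [PySem.List.enumerate_cons, List.length_cons, List.range_succ_eq_map]
      rw [List.filter_cons, List.filter_cons]
      have hpred : ∀ j : Nat, sq.contains (s + ((j : Int) + 1)) = sq.contains ((s + 1) + (j : Int)) := by
        intro j; congr 1; ring
      by_cases hc : sq.contains s
      · simp only [hc, if_true, Nat.cast_zero, add_zero, List.map_cons, List.sum_cons,
          List.filter_map, List.map_map, Function.comp_def, Nat.succ_eq_add_one]
        push_cast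
        simp only [hpred, ih (s + 1)]
        simp
      · simp only [hc, Bool.false_eq_true, if_false, Nat.cast_zero, add_zero,
          List.filter_map, List.map_map, Function.comp_def, Nat.succ_eq_add_one]
        push_cast
        simp only [hpred, ih (s + 1)]
        simp

-- ===== VERDICT (by name: the statement is the Claim_ definition above) =====
theorem calculate_special_sum_spec : Claim_equal_calculate_special_sum := by
  intro arr _
  unfold Spec_calculate_special_sum calculate_special_sum calculate_special_sum_alt
  have hA : calcA_go arr 0 0 0 = cntGo arr 1 0 := by
    simpa using go_eq arr 1 (le_refl 1) 0
  rw [hA, cnt_sum arr 1 (le_refl 1) 0, esum]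
  have hmem : ∀ j ∈ List.range arr.length,
      (PySem.Set.ofList ((PySem.List.pyRange 1 ((arr.length : Int) + 1) 1).map
          (fun k => k * k))).contains ((1 : Int) + (j : Int))
        = decide (Nat.sqrt (j + 1) * Nat.sqrt (j + 1) = j + 1) := by
    intro j hj
    rw [List.mem_range] at hj
    have h1 : ((1 : Int) + (j : Int)) ∈ PySem.Set.ofList
        ((PySem.List.pyRange 1 ((arr.length : Int) + 1) 1).map (fun k => k * k))
        ↔ Nat.sqrt (j + 1) * Nat.sqrt (j + 1) = j + 1 :=
      (PySem.Set.mem_ofList _ _).trans (mem_squares arr.length j hj)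
    rw [show (PySem.Set.ofList ((PySem.List.pyRange 1 ((arr.length : Int) + 1) 1).map
          (fun k => k * k))).contains ((1 : Int) + (j : Int))
        = List.contains (PySem.Set.ofList ((PySem.List.pyRange 1 ((arr.length : Int) + 1) 1).map
          (fun k => k * k))) ((1 : Int) + (j : Int)) from rfl,
      contains_eq_decide_mem]
    exact decide_eq_decide.mpr h1
  rw [List.filter_congr hmem, filter_sq_range, List.map_map]
  simp [Function.comp_def]
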